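-- pv_equiv track=rewrite | github.com/geosolutions-it/C179-DBIAIT | app/dbi_checks/tasks/checks_definitions/formulas_calc.py | exclude_abs_range_columns
-- ===== SOURCE A (Python) =====
-- def exclude_abs_range_columns(abs_rows, ranges_in_formula):
--     """
--     This method excludes from the abs_rows the columns that are part of a range
--     and not actual absolute columns (like B$2 but not B$1:B$1048576).
--     """
--     cleaned_columns = []
--
--     # Flatten the ranges_in_formula into a list of columns (excluding the sheet names)
--     columns_in_ranges = set()
--
--     for sheet, range_expr in ranges_in_formula:
--         # Ensure the range expression is valid and not empty
--         if range_expr and ":" in range_expr: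
--             start_col, end_col = range_expr.split(':')
--
--             # Ensure both parts are valid column references
--             if '$' in start_col and '$' in end_col:
--                 start_column = start_col.split('$')[1]  # Get the column part, e.g., "B" from "$B$1"
--                 end_column = end_col.split('$')[1]      # Get the column part, e.g., "B" from "$B$1048576"
--
--                 # Add both start and end columns to the set
--                 columns_in_ranges.add(start_column)
--                 columns_in_ranges.add(end_column)
--             else:
--                 # If the range is invalid or does not have valid columns, skip it
--                 continue
--
--     # For each absolute row found in the formula
--     for match in abs_rows:
--         column = match.split('$')[0]  # Extract the column part of the match (e.g., "B" from B$1)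
--
--         # If the column is not part of any range, add it to the cleaned list
--         if column not in columns_in_ranges:
--             cleaned_columns.append(match)
--
--     return cleaned_columns
-- ===== SOURCE B (Python) =====
-- def exclude_abs_range_columns(abs_rows, ranges_in_formula):
--     """Per-match direct scan of the ranges (no precomputed set of range
--     columns): a helper lists a range's endpoint columns, each absolute
--     reference is kept iff its column is in none of those lists."""
--
--     def range_cols(range_expr):
--         if ':' in range_expr:
--             parts = range_expr.split(':')
--             if len(parts) == 2 and '$' in parts[0] and '$' in parts[1]:
--                 return [parts[0].split('$')[1], parts[1].split('$')[1]]
--         return []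
--
--     return [m for m in abs_rows
--             if all(m.split('$')[0] not in range_cols(r)
--                    for _sheet, r in ranges_in_formula)]
-- ===== Notes on version B (the rewrite author's own statement) =====
-- stated objective: alternative
-- what changed: Drops A's precomputed set of range columns: B filters abs_rows with a per-match direct scan of ranges_in_formula through a helper that lists each range's endpoint columns, trading the O(n+m) set build plus membership test for an O(n*m) rescan with no auxiliary set.
import Mathlib
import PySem

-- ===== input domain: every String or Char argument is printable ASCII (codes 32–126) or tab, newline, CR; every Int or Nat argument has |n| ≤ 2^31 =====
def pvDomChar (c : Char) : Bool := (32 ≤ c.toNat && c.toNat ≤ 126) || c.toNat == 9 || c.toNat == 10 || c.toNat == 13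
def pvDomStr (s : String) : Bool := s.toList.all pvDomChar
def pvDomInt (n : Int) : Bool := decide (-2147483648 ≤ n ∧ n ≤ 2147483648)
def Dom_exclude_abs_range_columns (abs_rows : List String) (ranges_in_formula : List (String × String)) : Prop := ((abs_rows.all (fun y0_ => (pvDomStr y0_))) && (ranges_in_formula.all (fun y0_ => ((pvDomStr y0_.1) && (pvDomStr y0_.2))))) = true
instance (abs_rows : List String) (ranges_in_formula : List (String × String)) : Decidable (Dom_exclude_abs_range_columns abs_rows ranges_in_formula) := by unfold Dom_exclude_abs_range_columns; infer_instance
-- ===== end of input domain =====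

-- B drops A's precomputed set of range columns and filters abs_rows with a per-match
-- direct scan of the ranges (helper listing each range's endpoint columns) — an
-- alternative decomposition, not faster.

-- ===== PORT A =====
-- s.split(sep) for a nonempty separator: PySem.Str.split? is some there.
def pvSplit (s sep : String) : List String := (PySem.Str.split? s sep).getD []

-- One iteration of A's first loop, threaded through Option: `none` models the
-- ValueError Python raises when a range expression containing ':' splits into ≠ 2
-- parts (outside Pre_). split('$')[1] is in range under the `'$' in …` guard, so
-- `.getD 1 ""` is exact there.
def pvStepA (acc : Option (PySem.Set String)) (p : String × String) : Option (PySem.Set String) :=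
  match acc with
  | none => none
  | some s =>
    if (p.2 != "") && PySem.Str.isIn ":" p.2 then
      match pvSplit p.2 ":" with
      | [start_col, end_col] =>
        if PySem.Str.isIn "$" start_col && PySem.Str.isIn "$" end_col then
          some ((s.add ((pvSplit start_col "$").getD 1 "")).add
                  ((pvSplit end_col "$").getD 1 ""))
        else some s
      | _ => none   -- Python: ValueError (too many values to unpack)
    else some s

def exclude_abs_range_columns (abs_rows : List String) (ranges_in_formula : List (String × String)) : List String :=
  match ranges_in_formula.foldl pvStepA (some PySem.Set.empty) with
  | none => []   -- Python raises ValueError here; Pre_ excludes these inputs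
  | some columns_in_ranges =>
      abs_rows.foldl (fun cleaned m =>
        if PySem.Set.contains columns_in_ranges ((pvSplit m "$").getD 0 "")
        then cleaned else cleaned ++ [m]) []

-- ===== PORT B =====
-- B's helper range_cols, ported over List Char (PySem.Chars is the definition layer
-- of the Str wrappers; exact on the stated ASCII domain). The `len(parts) == 2`
-- guard is the `some [a, b]` pattern; a split/getD is in range under `'$' in …`.
def pvRangeCols (range_expr : List Char) : List (List Char) :=
  if PySem.Chars.isIn [':'] range_expr then
    match PySem.Chars.split? range_expr [':'] with
    | some [a, b] =>
      if PySem.Chars.isIn ['$'] a && PySem.Chars.isIn ['$'] b then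
        [((PySem.Chars.split? a ['$']).getD []).getD 1 [],
         ((PySem.Chars.split? b ['$']).getD []).getD 1 []]
      else []
    | _ => []
  else []

def exclude_abs_range_columns_alt (abs_rows : List String) (ranges_in_formula : List (String × String)) : List String :=
  abs_rows.filter (fun m =>
    ranges_in_formula.all (fun p =>
      ! (pvRangeCols p.2.toList).contains
          (((PySem.Chars.split? m.toList ['$']).getD []).getD 0 [])))

-- ===== PRECONDITION & SPEC =====
-- Pre_ excludes exactly the inputs where some range expression contains more than one
-- ':' — there Python A raises ValueError on unpacking range_expr.split(':').
def Pre_exclude_abs_range_columns (abs_rows : List String) (ranges_in_formula : List (String × String)) : Prop :=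
  ∀ p ∈ ranges_in_formula, PySem.Str.isIn ":" p.2 = true → (pvSplit p.2 ":").length = 2
instance (abs_rows : List String) (ranges_in_formula : List (String × String)) : Decidable (Pre_exclude_abs_range_columns abs_rows ranges_in_formula) := by unfold Pre_exclude_abs_range_columns; infer_instance

def pvWitness_exclude_abs_range_columns : List String × (List (String × String)) :=
  (["B$1", "C$2"], [("s", "$B$1:$B$9")])

def Spec_exclude_abs_range_columns (abs_rows : List String) (ranges_in_formula : List (String × String)) (out : List String) : Prop := out = exclude_abs_range_columns_alt abs_rows ranges_in_formula
instance (abs_rows : List String) (ranges_in_formula : List (String × String)) (out : List String) : Decidable (Spec_exclude_abs_range_columns abs_rows ranges_in_formula out) := by unfold Spec_exclude_abs_range_columns; infer_instance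

-- ===== CLAIM (what is proved, stated in full; the proofs are below) =====
def Claim_equal_exclude_abs_range_columns : Prop := ∀ (abs_rows : List String) (ranges_in_formula : List (String × String)), Dom_exclude_abs_range_columns abs_rows ranges_in_formula → Pre_exclude_abs_range_columns abs_rows ranges_in_formula → Spec_exclude_abs_range_columns abs_rows ranges_in_formula (exclude_abs_range_columns abs_rows ranges_in_formula)

-- ===== LEMMAS AND PROOFS =====

-- A's guard `r and ':' in r` equals B's `':' in r` (an empty string contains no ':').
lemma pv_guard_eq (r : String) :
    ((r != "") && PySem.Str.isIn ":" r) = PySem.Chars.isIn [':'] r.toList := by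
  by_cases h : r = ""
  · subst h; decide
  · simp [h, PySem.Str.isIn_eq]

-- Bridge: A's string-level split of s equals B's char-level split, mapped.
lemma pv_split_toList (s sep : String) (cs : List Char) (hcs : sep.toList = cs) (hsep : sep ≠ "") :
    PySem.Chars.split? s.toList cs = some ((pvSplit s sep).map String.toList) := by
  rw [← hcs, ← PySem.Str.split?_map]
  unfold pvSplit
  cases hs : PySem.Str.split? s sep with
  | none =>
    exfalso
    apply hsep
    rw [PySem.Str.split?, PySem.Chars.split?.eq_1] at hs
    by_cases he : sep.toList.isEmpty = true
    · exact String.toList_inj.mp (by simpa using List.isEmpty_iff.mp he)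
    · simp [he] at hs
  | some l => simp

lemma pv_getD_map_toList (l : List String) (i : Nat) :
    (l.map String.toList).getD i [] = (l.getD i "").toList := by
  cases h : l[i]? with
  | none => simp [List.getD, h]
  | some x => simp [List.getD, h]

lemma pv_contains_add_add (s : PySem.Set String) (x y c : String) :
    PySem.Set.contains ((s.add x).add y) c = (PySem.Set.contains s c || c == x || c == y) := by
  rw [Bool.eq_iff_iff]
  simp only [Bool.or_eq_true, PySem.Set.contains_iff, PySem.Set.mem_add, beq_iff_eq]

-- Per range, the pair of columns A inserts is exactly B's pvRangeCols list, and the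
-- guards coincide; stated as: membership after A's fold = B's any-scan.
lemma pvColsA_step (ranges : List (String × String))
    (h : ∀ p ∈ ranges, PySem.Str.isIn ":" p.2 = true → (pvSplit p.2 ":").length = 2)
    (s : PySem.Set String) :
    ∃ t, ranges.foldl pvStepA (some s) = some t ∧
      ∀ c : String, PySem.Set.contains t c =
        (PySem.Set.contains s c ||
          ranges.any (fun p => (pvRangeCols p.2.toList).contains c.toList)) := by
  induction ranges generalizing s with
  | nil => exact ⟨s, rfl, by simp⟩
  | cons p rest ih =>
    have hrest : ∀ q ∈ rest, PySem.Str.isIn ":" q.2 = true → (pvSplit q.2 ":").length = 2 :=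
      fun q hq => h q (List.mem_cons_of_mem _ hq)
    by_cases hg : ((p.2 != "") && PySem.Str.isIn ":" p.2) = true
    · have hg' : PySem.Chars.isIn [':'] p.2.toList = true := by rw [← pv_guard_eq]; exact hg
      have hlen : (pvSplit p.2 ":").length = 2 :=
        h p (List.mem_cons_self) (by simpa using (Bool.and_eq_true _ _ ▸ hg).2)
      obtain ⟨a, b, hab⟩ : ∃ a b, pvSplit p.2 ":" = [a, b] := by
        rcases hsplit : pvSplit p.2 ":" with _ | ⟨a, _ | ⟨b, _ | _⟩⟩ <;> simp_all
      have hchar : PySem.Chars.split? p.2.toList [':'] = some [a.toList, b.toList] := by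
        have := pv_split_toList p.2 ":" [':'] rfl (by decide)
        rw [hab] at this; simpa using this
      by_cases hd : (PySem.Str.isIn "$" a && PySem.Str.isIn "$" b) = true
      · have hd' : (PySem.Chars.isIn ['$'] a.toList && PySem.Chars.isIn ['$'] b.toList) = true := by
          simpa [PySem.Str.isIn_eq] using hd
        have hxa : ((PySem.Chars.split? a.toList ['$']).getD []).getD 1 []
            = ((pvSplit a "$").getD 1 "").toList := by
          rw [pv_split_toList a "$" ['$'] rfl (by decide)]; simpa using pv_getD_map_toList (pvSplit a "$") 1
        have hxb : ((PySem.Chars.split? b.toList ['$']).getD []).getD 1 []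
            = ((pvSplit b "$").getD 1 "").toList := by
          rw [pv_split_toList b "$" ['$'] rfl (by decide)]; simpa using pv_getD_map_toList (pvSplit b "$") 1
        have hstep : pvStepA (some s) p
            = some ((s.add ((pvSplit a "$").getD 1 "")).add ((pvSplit b "$").getD 1 "")) := by
          simp only [pvStepA, hg, hab, hd, if_true]
        obtain ⟨t, ht, hmem⟩ := ih hrest
          ((s.add ((pvSplit a "$").getD 1 "")).add ((pvSplit b "$").getD 1 ""))
        refine ⟨t, by rw [List.foldl_cons, hstep]; exact ht, fun c => ?_⟩
        have hcols : pvRangeCols p.2.toList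
            = [((pvSplit a "$").getD 1 "").toList, ((pvSplit b "$").getD 1 "").toList] := by
          simp only [pvRangeCols, hg', hchar, hd', if_true, hxa, hxb]
        rw [hmem c, pv_contains_add_add]
        simp only [List.any_cons, hcols]
        rw [Bool.eq_iff_iff]
        simp only [Bool.or_eq_true, List.contains_eq_mem, decide_eq_true_eq,
          List.mem_cons, List.not_mem_nil, or_false, beq_iff_eq,
          ← String.toList_inj]
        tauto
      · have hd2 : (PySem.Str.isIn "$" a && PySem.Str.isIn "$" b) = false := by
          rwa [Bool.not_eq_true] at hd
        have hd2' : (PySem.Chars.isIn ['$'] a.toList && PySem.Chars.isIn ['$'] b.toList) = false := by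
          simpa [PySem.Str.isIn_eq] using hd2
        have hstep : pvStepA (some s) p = some s := by
          simp only [pvStepA, hg, hab, hd2, if_true, Bool.false_eq_true, if_false]
        obtain ⟨t, ht, hmem⟩ := ih hrest s
        refine ⟨t, by rw [List.foldl_cons, hstep]; exact ht, fun c => ?_⟩
        have hcols : pvRangeCols p.2.toList = [] := by
          simp only [pvRangeCols, hg', hchar, hd2', if_true, Bool.false_eq_true, if_false]
        rw [hmem c]
        simp [hcols]
    · have hg2 : ((p.2 != "") && PySem.Str.isIn ":" p.2) = false := by
        rwa [Bool.not_eq_true] at hg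
      have hg2' : PySem.Chars.isIn [':'] p.2.toList = false := by rw [← pv_guard_eq]; exact hg2
      have hstep : pvStepA (some s) p = some s := by
        simp only [pvStepA, hg2, Bool.false_eq_true, if_false]
      obtain ⟨t, ht, hmem⟩ := ih hrest s
      refine ⟨t, by rw [List.foldl_cons, hstep]; exact ht, fun c => ?_⟩
      have hcols : pvRangeCols p.2.toList = [] := by
        simp only [pvRangeCols, hg2', Bool.false_eq_true, if_false]
      rw [hmem c]
      simp [hcols]

-- A's second loop ('if covered: skip else append') is a filter.
lemma pv_foldl_skip_if {α : Type} (p : α → Bool) (l : List α) (acc : List α) :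
    l.foldl (fun acc x => if p x then acc else acc ++ [x]) acc
      = acc ++ l.filter (fun x => ! p x) := by
  induction l generalizing acc with
  | nil => simp
  | cons x xs ih =>
    by_cases hx : p x = true <;> simp [List.foldl_cons, hx, ih]

-- ===== VERDICT (by name: the statement is the Claim_ definition above) =====
theorem exclude_abs_range_columns_spec : Claim_equal_exclude_abs_range_columns := by
  intro abs_rows ranges _ hpre
  unfold Spec_exclude_abs_range_columns exclude_abs_range_columns exclude_abs_range_columns_alt
  obtain ⟨t, ht, hmem⟩ := pvColsA_step ranges hpre PySem.Set.empty
  rw [ht]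
  simp only []
  rw [pv_foldl_skip_if]
  simp only [List.nil_append]
  apply List.filter_congr
  intro m _
  rw [hmem]
  have hcol : ((PySem.Chars.split? m.toList ['$']).getD []).getD 0 []
      = ((pvSplit m "$").getD 0 "").toList := by
    rw [pv_split_toList m "$" ['$'] rfl (by decide)]; simpa using pv_getD_map_toList (pvSplit m "$") 0
  rw [List.all_eq_not_any_not]
  simp only [Bool.not_not, hcol]
  simp [PySem.Set.empty]
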